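-- pv_equiv track=rewrite | github.com/jhkim07/Test-Aware_Debugging_Loop | bench_agent/editor/diff_generator.py | parse_multi_file_diff
-- ===== SOURCE A (Python) =====
-- from typing import List, Optional
--
-- def parse_multi_file_diff(diff: str) -> List[tuple[str, str]]:
--     """
--     Parse multi-file diff into (filepath, file_diff) pairs.
--
--     Args:
--         diff: Combined diff string
--
--     Returns:
--         List of (filepath, file_diff) tuples
--     """
--     files = []
--     current_file = None
--     current_diff_lines = []
--
--     for line in diff.split('\n'):
--         if line.startswith('--- a/'):
--             # Start of new file
--             if current_file and current_diff_lines: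
--                 files.append((current_file, '\n'.join(current_diff_lines)))
--
--             # Extract filepath
--             current_file = line[6:]  # Remove '--- a/'
--             current_diff_lines = [line]
--
--         elif current_diff_lines is not None:
--             current_diff_lines.append(line)
--
--     # Add last file
--     if current_file and current_diff_lines:
--         files.append((current_file, '\n'.join(current_diff_lines)))
--
--     return files
-- ===== SOURCE B (Python) =====
-- def parse_multi_file_diff(diff: str) -> list[tuple[str, str]]:
--     """Parse multi-file diff into (filepath, file_diff) pairs.
--
--     Index-table decomposition: collect every '--- a/' header position (with its
--     path) in one pass, then slice the line list between consecutive headers.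
--     """
--     lines = diff.split('\n')
--     headers = [(i, line[6:]) for i, line in enumerate(lines)
--                if line.startswith('--- a/')]
--     bounds = zip(headers, [i for i, _ in headers[1:]] + [len(lines)])
--     return [(path, '\n'.join(lines[i:end]))
--             for (i, path), end in bounds if path]
-- ===== Notes on version B (the rewrite author's own statement) =====
-- stated objective: alternative
-- what changed: A threads a running (current_file, current_diff_lines) accumulator through one stateful loop with flush-on-header logic; B first builds an index table of all '--- a/' header positions and then slices the line list between consecutive headers into per-file blocks.
import Mathlib
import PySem

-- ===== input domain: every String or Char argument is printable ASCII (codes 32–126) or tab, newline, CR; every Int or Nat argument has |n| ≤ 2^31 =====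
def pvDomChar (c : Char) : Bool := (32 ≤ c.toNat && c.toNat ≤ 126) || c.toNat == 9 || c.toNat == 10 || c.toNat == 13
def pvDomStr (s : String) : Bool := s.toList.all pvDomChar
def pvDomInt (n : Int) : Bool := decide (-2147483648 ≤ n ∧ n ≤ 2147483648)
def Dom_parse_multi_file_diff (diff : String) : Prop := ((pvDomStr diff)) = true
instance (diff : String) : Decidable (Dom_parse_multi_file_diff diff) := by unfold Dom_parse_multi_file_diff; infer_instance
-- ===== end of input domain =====

-- B replaces A's running-accumulator flush logic by an index-table-then-slice
-- decomposition (same asymptotic cost; objective: alternative decomposition).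

-- ===== PORT A =====
-- the "if current_file and current_diff_lines: files.append(...)" block (it occurs twice in A)
def pvAFlush (files : List (String × String)) (cf : Option String) (cdl : List String) :
    List (String × String) :=
  match cf with
  | some f => if f ≠ "" ∧ cdl ≠ [] then files ++ [(f, PySem.Str.join "\n" cdl)] else files
  | none => files

-- A's loop body. Note: A's "elif current_diff_lines is not None" is always True
-- (current_diff_lines is always a list), so the elif branch appends unconditionally.
def pvAStep (st : List (String × String) × Option String × List String) (line : String) :
    List (String × String) × Option String × List String :=
  if PySem.Str.startswith line "--- a/" then
    (pvAFlush st.1 st.2.1 st.2.2, some (PySem.Str.slice line (some 6)), [line])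
  else
    (st.1, st.2.1, st.2.2 ++ [line])

def parse_multi_file_diff (diff : String) : List (String × String) :=
  -- diff.split('\n'): sep ≠ "" so split? is always some
  let lines := (PySem.Str.split? diff "\n").getD []
  let st := lines.foldl pvAStep ([], none, [])
  pvAFlush st.1 st.2.1 st.2.2

-- ===== PORT B =====
def parse_multi_file_diff_alt (diff : String) : List (String × String) :=
  let lines := (PySem.Str.split? diff "\n").getD []
  let headers := (PySem.List.enumerate lines).filterMap (fun p =>
    if PySem.Str.startswith p.2 "--- a/" then some (p.1, PySem.Str.slice p.2 (some 6)) else none)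
  let bounds := headers.zip ((headers.drop 1).map (fun q => q.1) ++ [(lines.length : Int)])
  bounds.filterMap (fun q =>
    if q.1.2 ≠ "" then
      some (q.1.2, PySem.Str.join "\n" (PySem.List.slice lines (some q.1.1) (some q.2)))
    else none)

-- ===== PRECONDITION & SPEC =====
def Spec_parse_multi_file_diff (diff : String) (out : List (String × String)) : Prop := out = parse_multi_file_diff_alt diff
instance (diff : String) (out : List (String × String)) : Decidable (Spec_parse_multi_file_diff diff out) := by unfold Spec_parse_multi_file_diff; infer_instance

-- ===== CLAIM (what is proved, stated in full; the proofs are below) =====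
def Claim_equal_parse_multi_file_diff : Prop := ∀ (diff : String), Dom_parse_multi_file_diff diff → Spec_parse_multi_file_diff diff (parse_multi_file_diff diff)

-- ===== LEMMAS AND PROOFS =====

-- header test and path extraction, abbreviated for the proofs
def pvH (l : String) : Bool := PySem.Str.startswith l "--- a/"
def pvNH (l : String) : Bool := !pvH l
def pvPath (l : String) : String := PySem.Str.slice l (some 6)

-- the common "list of blocks" normal form both ports are reduced to
def pvBlocks (ls : List String) : List (String × String) :=
  match h : ls.dropWhile pvNH with
  | [] => []
  | hd :: rest =>
      (if pvPath hd ≠ "" then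
        [(pvPath hd, PySem.Str.join "\n" (hd :: rest.takeWhile pvNH))] else [])
      ++ pvBlocks (rest.dropWhile pvNH)
termination_by ls.length
decreasing_by
  have h1 : (ls.dropWhile pvNH).length ≤ ls.length := (List.dropWhile_sublist pvNH).length_le
  have h2 : (rest.dropWhile pvNH).length ≤ rest.length := (List.dropWhile_sublist pvNH).length_le
  rw [h] at h1; simp at h1; omega

lemma pvDropWhile_head {ls : List String} {hd : String} {rest : List String}
    (h : ls.dropWhile pvNH = hd :: rest) : pvH hd = true := by
  induction ls with
  | nil => simp at h
  | cons x xs ih =>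
      by_cases hx : pvNH x
      · rw [List.dropWhile_cons_of_pos hx] at h; exact ih h
      · rw [List.dropWhile_cons_of_neg hx] at h
        cases h; simpa [pvNH] using hx

lemma pvBlocks_eq {ls : List String} {hd : String} {rest : List String}
    (h : ls.dropWhile pvNH = hd :: rest) :
    pvBlocks ls =
      (if pvPath hd ≠ "" then
        [(pvPath hd, PySem.Str.join "\n" (hd :: rest.takeWhile pvNH))] else [])
      ++ pvBlocks (rest.dropWhile pvNH) := by
  rw [pvBlocks]
  split
  · next heq => rw [h] at heq; simp at heq
  · next hd' rest' heq =>
      rw [h] at heq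
      cases heq
      rfl

lemma pvBlocks_cons (hd : String) (rest : List String) (h : pvH hd = true) :
    pvBlocks (hd :: rest) =
      (if pvPath hd ≠ "" then
        [(pvPath hd, PySem.Str.join "\n" (hd :: rest.takeWhile pvNH))] else [])
      ++ pvBlocks (rest.dropWhile pvNH) :=
  pvBlocks_eq (List.dropWhile_cons_of_neg (by simp [pvNH, h]))

lemma pvBlocks_nil_of {ls : List String} (h : ls.dropWhile pvNH = []) : pvBlocks ls = [] := by
  rw [pvBlocks]; split
  · rfl
  · next hd rest heq => rw [h] at heq; simp at heq

lemma pvBlocks_dropWhile (ls : List String) : pvBlocks (ls.dropWhile pvNH) = pvBlocks ls := by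
  cases hdrop : ls.dropWhile pvNH with
  | nil => rw [pvBlocks_nil_of hdrop, pvBlocks_nil_of (ls := ([] : List String)) (by simp)]
  | cons hd rest =>
      have hhd : pvH hd = true := pvDropWhile_head hdrop
      rw [pvBlocks_cons hd rest hhd, pvBlocks_eq hdrop]

-- ===== A-side =====

def pvA (lines : List String) : List (String × String) :=
  let st := lines.foldl pvAStep ([], none, [])
  pvAFlush st.1 st.2.1 st.2.2

lemma pvAStep_h (st : List (String × String) × Option String × List String) (line : String)
    (h : pvH line = true) :
    pvAStep st line = (pvAFlush st.1 st.2.1 st.2.2, some (pvPath line), [line]) := by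
  unfold pvAStep
  rw [show PySem.Str.startswith line "--- a/" = pvH line from rfl, h]
  rfl

lemma pvAStep_nh (st : List (String × String) × Option String × List String) (line : String)
    (h : pvH line = false) :
    pvAStep st line = (st.1, st.2.1, st.2.2 ++ [line]) := by
  unfold pvAStep
  rw [show PySem.Str.startswith line "--- a/" = pvH line from rfl, h]
  rfl

lemma pvAFlush_some (fs : List (String × String)) (p : String) (cdl : List String)
    (hcdl : cdl ≠ []) :
    pvAFlush fs (some p) cdl = fs ++ (if p ≠ "" then [(p, PySem.Str.join "\n" cdl)] else []) := by
  unfold pvAFlush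
  by_cases hp : p = "" <;> simp [hp, hcdl]

lemma pvA_foldl_nh (seg : List String) (h : ∀ l ∈ seg, pvH l = false) :
    ∀ fs cf cdl, seg.foldl pvAStep (fs, cf, cdl) = (fs, cf, cdl ++ seg) := by
  induction seg with
  | nil => intro fs cf cdl; simp
  | cons x xs ih =>
      intro fs cf cdl
      rw [List.foldl_cons, pvAStep_nh _ _ (h x (by simp)),
        ih (fun l hl => h l (by simp [hl])) fs cf (cdl ++ [x])]
      simp

lemma pvA_run (n : Nat) : ∀ (ls : List String), ls.length ≤ n →
    ∀ (fs : List (String × String)) (p : String) (cdl : List String), cdl ≠ [] →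
    pvAFlush (ls.foldl pvAStep (fs, some p, cdl)).1 (ls.foldl pvAStep (fs, some p, cdl)).2.1
        (ls.foldl pvAStep (fs, some p, cdl)).2.2
    = fs ++ (if p ≠ "" then [(p, PySem.Str.join "\n" (cdl ++ ls.takeWhile pvNH))] else [])
         ++ pvBlocks (ls.dropWhile pvNH) := by
  induction n with
  | zero =>
      intro ls hlen fs p cdl hcdl
      have hnil : ls = [] := List.length_eq_zero_iff.mp (Nat.le_zero.mp hlen)
      subst hnil
      simp only [List.foldl_nil, List.takeWhile_nil, List.dropWhile_nil, List.append_nil]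
      rw [pvAFlush_some _ _ _ hcdl, pvBlocks_nil_of (ls := ([] : List String)) (by simp)]
      simp
  | succ n ih =>
      intro ls hlen fs p cdl hcdl
      have hsplit : ls.takeWhile pvNH ++ ls.dropWhile pvNH = ls := List.takeWhile_append_dropWhile
      have htk : ∀ l ∈ ls.takeWhile pvNH, pvH l = false := by
        intro l hl; simpa [pvNH] using List.mem_takeWhile_imp hl
      conv_lhs => rw [← hsplit]
      rw [List.foldl_append, pvA_foldl_nh _ htk]
      cases hdrop : ls.dropWhile pvNH with
      | nil =>
          simp only [List.foldl_nil]
          rw [pvAFlush_some _ _ _ (by simp [hcdl]),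
            pvBlocks_nil_of (ls := ([] : List String)) (by simp)]
          simp
      | cons hd rest =>
          have hhd : pvH hd = true := pvDropWhile_head hdrop
          rw [List.foldl_cons, pvAStep_h _ _ hhd]
          dsimp only
          have hlen' : rest.length ≤ n := by
            have h1 : (ls.dropWhile pvNH).length ≤ ls.length := (List.dropWhile_sublist pvNH).length_le
            rw [hdrop] at h1; simp at h1; omega
          rw [ih rest hlen' _ (pvPath hd) [hd] (by simp)]
          rw [pvAFlush_some fs p (cdl ++ ls.takeWhile pvNH) (by simp [hcdl]),
            pvBlocks_cons hd rest hhd]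
          simp

lemma pvA_eq_blocks (ls : List String) : pvA ls = pvBlocks ls := by
  unfold pvA
  have hsplit : ls.takeWhile pvNH ++ ls.dropWhile pvNH = ls := List.takeWhile_append_dropWhile
  have htk : ∀ l ∈ ls.takeWhile pvNH, pvH l = false := by
    intro l hl; simpa [pvNH] using List.mem_takeWhile_imp hl
  conv_lhs => rw [← hsplit]
  rw [List.foldl_append, pvA_foldl_nh _ htk]
  cases hdrop : ls.dropWhile pvNH with
  | nil =>
      simp only [List.foldl_nil]
      rw [pvBlocks_nil_of hdrop]
      rfl
  | cons hd rest =>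
      have hhd : pvH hd = true := pvDropWhile_head hdrop
      rw [List.foldl_cons, pvAStep_h _ _ hhd]
      dsimp only
      rw [pvA_run rest.length rest le_rfl _ (pvPath hd) [hd] (by simp)]
      rw [show pvAFlush ([] : List (String × String)) none ([] ++ ls.takeWhile pvNH) = [] from rfl]
      rw [← pvBlocks_dropWhile ls, hdrop, pvBlocks_cons hd rest hhd]
      simp

-- ===== B-side =====

def pvHs (lines : List String) (k : Int) : List (Int × String) :=
  (PySem.List.enumerate lines k).filterMap (fun p =>
    if PySem.Str.startswith p.2 "--- a/" then some (p.1, PySem.Str.slice p.2 (some 6)) else none)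

def pvB (lines : List String) : List (String × String) :=
  let headers := pvHs lines 0
  let bounds := headers.zip ((headers.drop 1).map (fun q => q.1) ++ [(lines.length : Int)])
  bounds.filterMap (fun q =>
    if q.1.2 ≠ "" then
      some (q.1.2, PySem.Str.join "\n" (PySem.List.slice lines (some q.1.1) (some q.2)))
    else none)

lemma pvHs_cons (x : String) (xs : List String) (k : Int) :
    pvHs (x :: xs) k = (if pvH x then [(k, pvPath x)] else []) ++ pvHs xs (k + 1) := by
  show ((k, x) :: PySem.List.enumerate xs (k + 1)).filterMap _ = _
  rw [List.filterMap_cons]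
  by_cases hx : pvH x
  · rw [show (if PySem.Str.startswith x "--- a/" then some ((k : Int), PySem.Str.slice x (some 6)) else none)
        = some (k, pvPath x) by rw [show PySem.Str.startswith x "--- a/" = pvH x from rfl, hx]; rfl]
    simp [pvHs, hx]
  · rw [show (if PySem.Str.startswith x "--- a/" then some ((k : Int), PySem.Str.slice x (some 6)) else none)
        = none by rw [show PySem.Str.startswith x "--- a/" = pvH x from rfl,
                      show pvH x = false by simpa using hx]; rfl]
    simp [pvHs, hx]

lemma pvHs_shift (xs : List String) : ∀ (k : Int),
    pvHs xs k = (pvHs xs 0).map (fun p => (p.1 + k, p.2)) := by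
  induction xs with
  | nil => intro k; simp [pvHs, PySem.List.enumerate]
  | cons x xs ih =>
      intro k
      rw [pvHs_cons, pvHs_cons, ih (k + 1), ih (0 + 1)]
      rw [List.map_append, List.map_map]
      congr 1
      · split_ifs <;> simp
      · apply List.map_congr_left; intro p _; simp; ring

lemma pvHs_nil_iff (xs : List String) (k : Int) :
    pvHs xs k = [] ↔ ∀ l ∈ xs, pvH l = false := by
  induction xs generalizing k with
  | nil => simp [pvHs, PySem.List.enumerate]
  | cons x xs ih =>
      rw [pvHs_cons]
      constructor
      · intro h
        rcases List.append_eq_nil_iff.mp h with ⟨h1, h2⟩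
        intro l hl
        rcases List.mem_cons.mp hl with rfl | hl'
        · by_contra hc; simp [eq_true_of_ne_false hc] at h1
        · exact (ih (k+1)).mp h2 l hl'
      · intro h
        rw [if_neg (by simp [h x (by simp)]), List.nil_append]
        exact (ih (k+1)).mpr (fun l hl => h l (by simp [hl]))

lemma pvHs_mem_nonneg {xs : List String} : ∀ {k : Int}, 0 ≤ k →
    ∀ p ∈ pvHs xs k, 0 ≤ p.1 := by
  induction xs with
  | nil => intro k _ p hp; simp [pvHs, PySem.List.enumerate] at hp
  | cons x xs ih =>
      intro k hk p hp
      rw [pvHs_cons] at hp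
      rcases List.mem_append.mp hp with h1 | h2
      · split_ifs at h1 <;> simp_all
      · exact ih (by omega) p h2

-- the end bound of the first block inside `rest` is the length of its non-header prefix
lemma pvHs_first_idx (rest : List String) : ∀ q qs, pvHs rest 0 = q :: qs →
    q.1 = ((rest.takeWhile pvNH).length : Int) := by
  induction rest with
  | nil => intro q qs h; simp [pvHs, PySem.List.enumerate] at h
  | cons x xs ih =>
      intro q qs h
      by_cases hx : pvH x
      · rw [pvHs_cons, if_pos hx, List.singleton_append] at h
        injection h with h1 h2
        rw [← h1, List.takeWhile_cons_of_neg (by simp [pvNH, hx] : ¬ (pvNH x = true))]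
        rfl
      · rw [pvHs_cons, if_neg (by simp [hx]), List.nil_append, pvHs_shift xs (0 + 1)] at h
        cases hxs : pvHs xs 0 with
        | nil => rw [hxs] at h; simp at h
        | cons q' qs' =>
            rw [hxs, List.map_cons] at h
            injection h with h1 h2
            have hq' := ih q' qs' hxs
            rw [← h1, List.takeWhile_cons_of_pos (by simp [pvNH, hx])]
            simp only [List.length_cons]
            push_cast
            omega

lemma pySlice_append_shift (pre ys : List String) (i e : Int) (hi : 0 ≤ i) (he : 0 ≤ e) :
    PySem.List.slice (pre ++ ys) (some (i + pre.length)) (some (e + pre.length))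
      = PySem.List.slice ys (some i) (some e) := by
  rw [PySem.List.slice_toNat _ (by omega) (by omega), PySem.List.slice_toNat _ hi he]
  rw [show (i + (pre.length : Int)).toNat = pre.length + i.toNat from by omega]
  rw [show (e + (pre.length : Int)).toNat - (pre.length + i.toNat) = e.toNat - i.toNat from by omega]
  rw [List.drop_append]
  rw [List.drop_of_length_le (by omega : pre.length ≤ pre.length + i.toNat)]
  rw [show pre.length + i.toNat - pre.length = i.toNat from by omega]
  simp

lemma pvHs_append_nh (pre ys : List String) (k : Int) (hpre : ∀ l ∈ pre, pvH l = false) :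
    pvHs (pre ++ ys) k = pvHs ys (k + pre.length) := by
  induction pre generalizing k with
  | nil => simp
  | cons x xs ih =>
      rw [List.cons_append, pvHs_cons, if_neg (by simp [hpre x (by simp)]), List.nil_append,
        ih (k + 1) (fun l hl => hpre l (by simp [hl]))]
      congr 1
      push_cast [List.length_cons]
      ring

-- hd :: (the non-header prefix of rest) is the take up to the first header of rest
lemma pvTakeWhile_eq_take (l : List String) :
    l.take (l.takeWhile pvNH).length = l.takeWhile pvNH :=
  (List.prefix_iff_eq_take.mp (List.takeWhile_prefix pvNH)).symm

-- shifting every index/bound by len(pre2) and slicing pre2 ++ rest is slicing rest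
lemma pvB_zip_shift (pre2 rest : List String) (ps : List (Int × String)) (es : List Int)
    (hps : ∀ p ∈ ps, 0 ≤ p.1) (hes : ∀ e ∈ es, 0 ≤ e) :
    ((ps.map (fun p => (p.1 + ((pre2.length : Nat) : Int), p.2))).zip
        (es.map (fun e => e + ((pre2.length : Nat) : Int)))).filterMap
      (fun q => if q.1.2 ≠ "" then
          some (q.1.2, PySem.Str.join "\n" (PySem.List.slice (pre2 ++ rest) (some q.1.1) (some q.2)))
        else none)
    = (ps.zip es).filterMap
      (fun q => if q.1.2 ≠ "" then
          some (q.1.2, PySem.Str.join "\n" (PySem.List.slice rest (some q.1.1) (some q.2)))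
        else none) := by
  rw [List.zip_map, List.filterMap_map]
  apply List.filterMap_congr
  intro z hz
  obtain ⟨⟨i, s⟩, e⟩ := z
  obtain ⟨hz1, hz2⟩ := List.of_mem_zip hz
  simp only [Function.comp, Prod.map]
  rw [pySlice_append_shift pre2 rest i e (hps _ hz1) (hes _ hz2)]

lemma pvB_decomp (pre : List String) (hd : String) (rest : List String)
    (hpre : ∀ l ∈ pre, pvH l = false) (hhd : pvH hd = true) :
    pvB (pre ++ hd :: rest) =
      (if pvPath hd ≠ "" then
        [(pvPath hd, PySem.Str.join "\n" (hd :: rest.takeWhile pvNH))] else [])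
      ++ pvB rest := by
  have h_hs : pvHs (pre ++ hd :: rest) 0
      = (((pre.length : Int)), pvPath hd)
        :: (pvHs rest 0).map (fun p => (p.1 + ((pre.length : Int) + 1), p.2)) := by
    rw [pvHs_append_nh pre _ 0 hpre, pvHs_cons, pvHs_shift rest (0 + (pre.length : Int) + 1)]
    simp [hhd]
  have h_len : (((pre ++ hd :: rest).length : Nat) : Int)
      = ((rest.length : Int) + 1) + (pre.length : Int) := by
    push_cast [List.length_append, List.length_cons]; ring
  simp only [pvB]
  rw [h_hs]
  cases hq : pvHs rest 0 with
  | nil =>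
      have hall : ∀ l ∈ rest, pvH l = false := (pvHs_nil_iff rest 0).mp hq
      have htk : rest.takeWhile pvNH = rest := List.takeWhile_eq_self_iff.mpr (by
        intro a ha; simp [pvNH, hall a ha])
      have hsl : PySem.List.slice (pre ++ hd :: rest) (some ((pre.length : Int)))
          (some (((pre ++ hd :: rest).length : Int))) = hd :: rest := by
        rw [h_len]
        have := pySlice_append_shift pre (hd :: rest) 0 ((rest.length : Int) + 1)
          le_rfl (by positivity)
        rw [zero_add] at this
        rw [this, PySem.List.slice_toNat _ le_rfl (by positivity)]
        rw [show ((rest.length : Int) + 1).toNat - (0 : Int).toNat = rest.length + 1 from by omega,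
          show (0 : Int).toNat = 0 from rfl, List.drop_zero]
        exact List.take_of_length_le (by simp)
      simp only [List.map_nil, List.drop_succ_cons, List.drop_zero,
        List.nil_append, List.zip_cons_cons, List.zip_nil_left, List.zip_nil_right,
        List.filterMap_cons, List.filterMap_nil]
      rw [hsl, htk]
      by_cases hp : pvPath hd = "" <;> simp [hp]
  | cons q qs =>
      have hq1 : q.1 = ((rest.takeWhile pvNH).length : Int) := pvHs_first_idx rest q qs hq
      have hq1n : 0 ≤ q.1 := pvHs_mem_nonneg le_rfl q (by rw [hq]; simp)
      -- the first block's slice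
      have hsl : PySem.List.slice (pre ++ hd :: rest) (some ((pre.length : Int)))
          (some (q.1 + ((pre.length : Int) + 1))) = hd :: rest.takeWhile pvNH := by
        have := pySlice_append_shift pre (hd :: rest) 0 (q.1 + 1) le_rfl (by omega)
        rw [zero_add] at this
        rw [show q.1 + ((pre.length : Int) + 1) = (q.1 + 1) + (pre.length : Int) from by ring,
          this, PySem.List.slice_toNat _ le_rfl (by omega)]
        rw [show (q.1 + 1).toNat - (0 : Int).toNat = (rest.takeWhile pvNH).length + 1 from by omega,
          show (0 : Int).toNat = 0 from rfl, List.drop_zero]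
        rw [List.take_succ_cons, pvTakeWhile_eq_take]
      have hps : ∀ p ∈ q :: qs, 0 ≤ p.1 := by
        rw [← hq]; exact pvHs_mem_nonneg le_rfl
      have hes : ∀ e ∈ (qs.map (fun r => r.1)) ++ [((rest.length : Nat) : Int)], 0 ≤ e := by
        intro e he
        rcases List.mem_append.mp he with h1 | h2
        · obtain ⟨p', hp', rfl⟩ := List.mem_map.mp h1
          exact hps p' (List.mem_cons_of_mem _ hp')
        · rw [List.mem_singleton.mp h2]; positivity
      have e_nexts : (List.map (fun p => (p.1 + ((pre.length : Int) + 1), p.2)) qs).map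
            (fun r => r.1) ++ [(((pre ++ hd :: rest).length : Nat) : Int)]
          = List.map (fun e => e + ((pre.length : Int) + 1))
              ((qs.map (fun r => r.1)) ++ [((rest.length : Nat) : Int)]) := by
        rw [List.map_append, List.map_map, List.map_map]
        have h1 : List.map ((fun r : Int × String => r.1) ∘
              (fun p : Int × String => (p.1 + ((pre.length : Int) + 1), p.2))) qs
            = List.map ((fun e : Int => e + ((pre.length : Int) + 1)) ∘
              (fun r : Int × String => r.1)) qs :=
          List.map_congr_left (fun p _ => by simp [Function.comp])
        rw [h1]
        simp only [List.map_cons, List.map_nil, List.append_cancel_left_eq, List.cons.injEq,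
          and_true]
        rw [h_len]; ring
      have hshift := pvB_zip_shift (pre ++ [hd]) rest (q :: qs)
        ((qs.map (fun r => r.1)) ++ [((rest.length : Nat) : Int)]) hps hes
      rw [show (((pre ++ [hd]).length : Nat) : Int) = (pre.length : Int) + 1 from by simp,
          show (pre ++ [hd]) ++ rest = pre ++ hd :: rest from by simp] at hshift
      simp only [List.drop_succ_cons, List.drop_zero, List.map_cons, List.cons_append]
      simp only [List.zip_cons_cons, List.filterMap_cons]
      rw [e_nexts]
      simp only [List.map_cons] at hshift
      rw [hshift, hsl]
      by_cases hp : pvPath hd = "" <;> simp [hp]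

lemma pvB_eq_blocks (n : Nat) : ∀ (ls : List String), ls.length ≤ n → pvB ls = pvBlocks ls := by
  induction n with
  | zero =>
      intro ls hlen
      have hnil : ls = [] := List.length_eq_zero_iff.mp (Nat.le_zero.mp hlen)
      subst hnil
      simp [pvB, pvHs, PySem.List.enumerate, pvBlocks_nil_of (ls := ([] : List String)) (by simp)]
  | succ n ih =>
      intro ls hlen
      cases hdrop : ls.dropWhile pvNH with
      | nil =>
          have hall : ∀ l ∈ ls, pvH l = false := by
            intro l hl
            have := List.dropWhile_eq_nil_iff.mp hdrop l hl
            simpa [pvNH] using this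
          have hhs : pvHs ls 0 = [] := (pvHs_nil_iff ls 0).mpr hall
          simp [pvB, hhs, pvBlocks_nil_of hdrop]
      | cons hd rest =>
          have hhd : pvH hd = true := pvDropWhile_head hdrop
          have hsplit : ls.takeWhile pvNH ++ ls.dropWhile pvNH = ls := List.takeWhile_append_dropWhile
          have htk : ∀ l ∈ ls.takeWhile pvNH, pvH l = false := by
            intro l hl; simpa [pvNH] using List.mem_takeWhile_imp hl
          have heq : ls = ls.takeWhile pvNH ++ hd :: rest := by rw [← hdrop, hsplit]
          rw [heq, pvB_decomp _ _ _ htk hhd]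
          have hlen' : rest.length ≤ n := by
            have h1 : (ls.dropWhile pvNH).length ≤ ls.length := (List.dropWhile_sublist pvNH).length_le
            rw [hdrop] at h1; simp at h1; omega
          rw [ih rest hlen']
          rw [← heq, ← pvBlocks_dropWhile ls, hdrop, pvBlocks_cons hd rest hhd, pvBlocks_dropWhile]

-- ===== VERDICT (by name: the statement is the Claim_ definition above) =====
theorem parse_multi_file_diff_spec : Claim_equal_parse_multi_file_diff := by
  intro diff _
  show parse_multi_file_diff diff = parse_multi_file_diff_alt diff
  have hA : parse_multi_file_diff diff = pvA ((PySem.Str.split? diff "\n").getD []) := rfl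
  have hB : parse_multi_file_diff_alt diff = pvB ((PySem.Str.split? diff "\n").getD []) := rfl
  rw [hA, hB, pvA_eq_blocks, pvB_eq_blocks ((PySem.Str.split? diff "\n").getD []).length _ le_rfl]
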